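-- pv_equiv track=rewrite | github.com/rudi193-cmd/willow-1.5 | hooks/bootloader.py | _format_compact_summary
-- ===== SOURCE A (Python) =====
-- def _format_compact_summary(index: dict) -> str:
--     """Format the compact index as a minimal reference block."""
--     if not index:
--         return ""
--     by_category = {}
--     for cid, meta in index.items():
--         cat = meta.get("category", "unknown")
--         if cat not in by_category:
--             by_category[cat] = []
--         label = meta.get("label", "")
--         by_category[cat].append(f"{cid}" + (f" ({label})" if label else ""))
--
--     lines = ["[BASE 17 — Available Compact Contexts]"]
--     for cat, entries in sorted(by_category.items()):
--         lines.append(f"  {cat}: {', '.join(entries)}")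
--     lines.append("Use [CTX:XXXXX] to reference. Content resolved on demand.")
--     return "\n".join(lines)
-- ===== SOURCE B (Python) =====
-- def _format_compact_summary(index: dict) -> str:
--     """Format the compact index as a minimal reference block."""
--     if not index:
--         return ""
--     cats = sorted({meta.get("category", "unknown") for meta in index.values()})
--     lines = ["[BASE 17 — Available Compact Contexts]"]
--     for cat in cats:
--         entries = ", ".join(
--             cid + (f" ({meta.get('label', '')})" if meta.get("label", "") else "")
--             for cid, meta in index.items()
--             if meta.get("category", "unknown") == cat
--         )
--         lines.append(f"  {cat}: {entries}")
--     lines.append("Use [CTX:XXXXX] to reference. Content resolved on demand.")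
--     return "\n".join(lines)
-- ===== Notes on version B (the rewrite author's own statement) =====
-- stated objective: alternative
-- what changed: Replaced the dict-of-lists grouping pass followed by sorting the dict items with: build the sorted set of distinct categories once, then emit each category's line by a direct filtered comprehension over the index.
import Mathlib
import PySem

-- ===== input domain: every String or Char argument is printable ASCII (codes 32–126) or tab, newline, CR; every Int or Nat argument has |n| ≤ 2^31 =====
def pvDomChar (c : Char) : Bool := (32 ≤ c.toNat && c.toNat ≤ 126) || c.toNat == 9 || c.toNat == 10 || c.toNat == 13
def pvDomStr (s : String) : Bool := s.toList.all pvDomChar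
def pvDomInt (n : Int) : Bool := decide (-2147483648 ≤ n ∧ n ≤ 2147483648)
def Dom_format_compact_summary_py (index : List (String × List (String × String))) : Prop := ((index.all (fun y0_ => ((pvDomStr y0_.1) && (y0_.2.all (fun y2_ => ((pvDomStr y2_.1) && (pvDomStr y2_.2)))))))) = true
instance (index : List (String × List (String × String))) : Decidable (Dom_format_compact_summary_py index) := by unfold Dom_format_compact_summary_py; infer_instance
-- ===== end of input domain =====

-- B is an alternative decomposition: sorted set of distinct categories plus one filter pass per
-- category, instead of A's dict-of-lists grouping followed by sorting the dict items.

-- meta.get(k, dflt) on the meta dict (association list, first-match lookup); shared by both ports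
def pvGet (m : List (String × String)) (k dflt : String) : String :=
  (PySem.Dict.mk m).getD k dflt

-- ===== PORT A =====
def format_compact_summary_py (index : List (String × List (String × String))) : String :=
  if index = [] then "" else
  let by_category : PySem.Dict String (List String) :=
    index.foldl (fun d p =>
      let cat := pvGet p.2 "category" "unknown"
      let d := if d.contains cat then d else d.insert cat []
      let label := pvGet p.2 "label" ""
      d.insert cat (d.getD cat [] ++ [p.1 ++ (if label ≠ "" then " (" ++ label ++ ")" else "")]))
      PySem.Dict.empty
  -- sorted(by_category.items()): dict keys are distinct, so Python's pair comparison is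
  -- decided by the first component — sort key = fst is exact here
  let lines := ["[BASE 17 — Available Compact Contexts]"]
    ++ (PySem.List.sorted by_category.items (fun p => p.1) false).map
         (fun p => "  " ++ p.1 ++ ": " ++ PySem.Str.join ", " p.2)
    ++ ["Use [CTX:XXXXX] to reference. Content resolved on demand."]
  PySem.Str.join "\n" lines

-- ===== PORT B =====
def pvCatB (p : String × List (String × String)) : String :=
  pvGet p.2 "category" "unknown"

def pvEntryB (p : String × List (String × String)) : String :=
  let label := pvGet p.2 "label" ""
  p.1 ++ (if label ≠ "" then " (" ++ label ++ ")" else "")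

def format_compact_summary_py_alt (index : List (String × List (String × String))) : String :=
  if index = [] then "" else
  let cats := PySem.List.sorted (PySem.Set.ofList (index.map pvCatB)) (fun c => c) false
  let body := cats.map (fun cat =>
    "  " ++ cat ++ ": "
      ++ PySem.Str.join ", " ((index.filter (fun p => pvCatB p == cat)).map pvEntryB))
  PySem.Str.join "\n"
    (["[BASE 17 — Available Compact Contexts]"] ++ body
      ++ ["Use [CTX:XXXXX] to reference. Content resolved on demand."])

-- ===== PRECONDITION & SPEC =====
def Spec_format_compact_summary_py (index : List (String × List (String × String))) (out : String) : Prop := out = format_compact_summary_py_alt index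
instance (index : List (String × List (String × String))) (out : String) : Decidable (Spec_format_compact_summary_py index out) := by unfold Spec_format_compact_summary_py; infer_instance

-- ===== CLAIM (what is proved, stated in full; the proofs are below) =====
def Claim_equal_format_compact_summary_py : Prop := ∀ (index : List (String × List (String × String))), Dom_format_compact_summary_py index → Spec_format_compact_summary_py index (format_compact_summary_py index)

-- ===== LEMMAS AND PROOFS =====

-- Dict.modify is insert of the current value
theorem pvModifyEq (d : PySem.Dict String (List String)) (k : String)
    (f : List String → List String) :
    d.modify k [] f = d.insert k (f (d.getD k [])) := (PySem.Dict.ext_iff.mpr rfl).symm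

-- A's loop body (ensure key present, then append) is a single Dict.modify
theorem pvStepEq (d : PySem.Dict String (List String)) (cat e : String) :
    (let d := if d.contains cat then d else d.insert cat []
     d.insert cat (d.getD cat [] ++ [e]))
    = d.modify cat [] (· ++ [e]) := by
  rw [pvModifyEq]
  by_cases h : d.contains cat
  · simp only [h, if_true]
  · simp only [h, Bool.false_eq_true, if_false, PySem.Dict.getD_insert_self,
      PySem.Dict.insert_insert_self, List.nil_append,
      PySem.Dict.getD_of_not_contains d [] (Bool.eq_false_iff.mpr h)]

-- items of the grouping fold, as a map over the deduped category list
theorem pvItemsA (index : List (String × List (String × String))) :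
    ((index.map (fun p => (pvCatB p, pvEntryB p))).foldl
        (fun d q => d.modify q.1 [] (· ++ [q.2])) PySem.Dict.empty).items
      = (PySem.Set.ofList (index.map pvCatB)).map
          (fun c => (c, (index.filter (fun p => pvCatB p == c)).map pvEntryB)) := by
  set l := index.map (fun p => (pvCatB p, pvEntryB p)) with hl
  have hkeys : (l.foldl (fun d q => d.modify q.1 [] (· ++ [q.2])) PySem.Dict.empty).keys
      = PySem.Set.ofList (index.map pvCatB) := by
    rw [PySem.Dict.keys_foldl_modify_key l Prod.fst [] (fun _ q v => v ++ [q.2]) PySem.Dict.empty]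
    simp [hl, PySem.Set.update, PySem.Set.ofList, List.map_map, Function.comp_def]
  have hnd : (l.foldl (fun d q => d.modify q.1 [] (· ++ [q.2])) PySem.Dict.empty).keys.Nodup := by
    apply PySem.Dict.nodup_keys_foldl_modify_key l Prod.fst [] (fun _ q v => v ++ [q.2])
    simp [PySem.Dict.keys_empty]
  rw [PySem.Dict.items_eq_map_keys _ hnd [], hkeys]
  apply List.map_congr_left
  intro c hc
  rw [PySem.Dict.getD_foldl_modify_append l PySem.Dict.empty c]
  simp [hl, List.filter_map, Function.comp_def, List.map_map]

-- sorting the grouped items by their key is mapping the grouping over the sorted key set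
theorem pvSortedMap (cats : List String)
    (g : String → String × List String) (hg : ∀ c, (g c).1 = c) :
    PySem.List.sorted ((PySem.Set.ofList cats).map g) (fun p => p.1) false
      = (PySem.List.sorted (PySem.Set.ofList cats) (fun c => c) false).map g := by
  apply PySem.List.sorted_eq_of_perm_of_pairwise_lt
  · exact (PySem.List.sorted_perm (PySem.Set.ofList cats) (fun c => c) false).map g
  · rw [List.pairwise_map]
    have := PySem.List.sorted_ofList_pairwise_lt cats
    exact this.imp (by intro a b hab; simpa [hg] using hab)

-- ===== VERDICT (by name: the statement is the Claim_ definition above) =====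
theorem format_compact_summary_py_spec : Claim_equal_format_compact_summary_py := by
  intro index _
  unfold Spec_format_compact_summary_py format_compact_summary_py format_compact_summary_py_alt
  by_cases hnil : index = []
  · simp [hnil]
  · simp only [hnil, if_false]
    have hfold : index.foldl (fun d p =>
        let cat := pvGet p.2 "category" "unknown"
        let d := if d.contains cat then d else d.insert cat []
        let label := pvGet p.2 "label" ""
        d.insert cat (d.getD cat []
          ++ [p.1 ++ (if label ≠ "" then " (" ++ label ++ ")" else "")])) PySem.Dict.empty
      = (index.map (fun p => (pvCatB p, pvEntryB p))).foldl
          (fun d q => d.modify q.1 [] (· ++ [q.2])) PySem.Dict.empty := by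
      rw [List.foldl_map]
      have hfun : ∀ (d : PySem.Dict String (List String)) (p : String × List (String × String)),
          (let cat := pvGet p.2 "category" "unknown"
           let d := if d.contains cat then d else d.insert cat []
           let label := pvGet p.2 "label" ""
           d.insert cat (d.getD cat []
             ++ [p.1 ++ (if label ≠ "" then " (" ++ label ++ ")" else "")]))
          = d.modify (pvCatB p) [] (· ++ [pvEntryB p]) :=
        fun d p => pvStepEq d (pvCatB p) (pvEntryB p)
      simp only [hfun]
    rw [hfold, pvItemsA index,
      pvSortedMap (index.map pvCatB)
        (fun c => (c, (index.filter (fun p => pvCatB p == c)).map pvEntryB)) (fun _ => rfl),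
      List.map_map]
    simp only [Function.comp_def]
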